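-- pv_equiv track=rewrite | github.com/Fadhilkhan04/sem-3-python | python/practice/gridGameFinal.py | create_grid
-- ===== SOURCE A (Python) =====
-- def create_grid(rows):
--     grid = []
--     value_to_coord = {}
--     val = 1
--     for i in range(rows):
--         row = [val + j for j in range(rows)]
--         if i % 2 == 1:
--             row.reverse()
--         grid.append(row)
--         for j in range(rows):
--             value_to_coord[row[j]] = (i, j)
--         val += rows
--     return grid, value_to_coord
-- ===== SOURCE B (Python) =====
-- def create_grid(rows):
--     grid = []
--     if rows > 0:
--         row = list(range(1, rows + 1))
--         grid.append(row)
--         for i in range(1, rows):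
--             row = [2 * i * rows + 1 - x for x in row]
--             grid.append(row)
--     value_to_coord = {v: (i, j) for i, row in enumerate(grid) for j, v in enumerate(row)}
--     return grid, value_to_coord
-- ===== Notes on version B (the rewrite author's own statement) =====
-- stated objective: alternative
-- what changed: B builds the grid by a row recurrence — each row is the pointwise reflection 2*i*rows+1-x of the previous row, with no reverse, no parity branch and no running val accumulator — and fills value_to_coord in a separate staged pass over the finished grid, where A interleaves a per-row coordinate loop.
import Mathlib
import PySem

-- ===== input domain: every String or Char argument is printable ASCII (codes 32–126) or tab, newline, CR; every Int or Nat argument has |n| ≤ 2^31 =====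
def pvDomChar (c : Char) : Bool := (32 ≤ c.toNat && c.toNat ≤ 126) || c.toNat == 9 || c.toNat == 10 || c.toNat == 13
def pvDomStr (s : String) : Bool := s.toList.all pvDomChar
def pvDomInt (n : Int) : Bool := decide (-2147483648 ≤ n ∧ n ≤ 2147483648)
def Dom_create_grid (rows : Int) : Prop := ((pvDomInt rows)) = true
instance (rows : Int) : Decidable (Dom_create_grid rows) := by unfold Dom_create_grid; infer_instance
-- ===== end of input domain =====

-- B builds each row from the previous by the reflection x ↦ 2*i*rows+1-x (no reverse, no parity
-- branch, no running val) and fills the coordinate map in a separate staged pass (objective: alternative).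

-- ===== PORT A =====
-- loop body of A's 'for i in range(rows)': state = (grid, value_to_coord, val)
def aBody (rows : Int) (st : List (List Int) × PySem.Dict Int (Int × Int) × Int) (i : Int) :
    List (List Int) × PySem.Dict Int (Int × Int) × Int :=
  let grid := st.1
  let d := st.2.1
  let val := st.2.2
  let row0 := (PySem.List.pyRange 0 rows 1).map (fun j => val + j)        -- [val + j for j in range(rows)]
  let row := if PySem.Int.mod i 2 = 1 then row0.reverse else row0         -- row.reverse()
  let grid' := grid ++ [row]                                              -- grid.append(row)
  -- for j in range(rows): value_to_coord[row[j]] = (i, j)   (j is always in range, so pyGetD is exact here)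
  let d' := (PySem.List.pyRange 0 rows 1).foldl (fun d j => d.insert (PySem.List.pyGetD row j 0) (i, j)) d
  (grid', d', val + rows)

def create_grid (rows : Int) : List (List Int) × (List (Int × Int × Int)) :=
  let st := (PySem.List.pyRange 0 rows 1).foldl (aBody rows) ([], PySem.Dict.empty, 1)
  (st.1, st.2.1.items)

-- ===== PORT B =====
-- Source B: first row = list(range(1, rows+1)); then 'for i in range(1, rows): row = [2*i*rows+1-x for x in row]';
-- state of the loop = (grid so far, current row)
def create_grid_alt (rows : Int) : List (List Int) × (List (Int × Int × Int)) :=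
  let grid :=
    if rows > 0 then
      let row := PySem.List.pyRange 1 (rows + 1) 1                        -- list(range(1, rows+1))
      ((PySem.List.pyRange 1 rows 1).foldl
        (fun st i =>
          let row := st.2.map (fun x => 2 * i * rows + 1 - x)             -- [2*i*rows + 1 - x for x in row]
          (st.1 ++ [row], row))
        ([row], row)).1
    else []
  -- {v: (i, j) for i, row in enumerate(grid) for j, v in enumerate(row)}
  let d := (PySem.List.enumerate grid 0).foldl
      (fun d p => (PySem.List.enumerate p.2 0).foldl
          (fun d q => d.insert q.2 (p.1, q.1)) d)
      PySem.Dict.empty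
  (grid, d.items)

-- ===== PRECONDITION & SPEC =====
def Spec_create_grid (rows : Int) (out : List (List Int) × (List (Int × Int × Int))) : Prop := out = create_grid_alt rows
instance (rows : Int) (out : List (List Int) × (List (Int × Int × Int))) : Decidable (Spec_create_grid rows out) := by unfold Spec_create_grid; infer_instance

-- ===== CLAIM (what is proved, stated in full; the proofs are below) =====
def Claim_equal_create_grid : Prop := ∀ (rows : Int), Dom_create_grid rows → Spec_create_grid rows (create_grid rows)

-- ===== LEMMAS AND PROOFS =====

-- the canonical cell value both programs produce at (i, j)
def cellB (rows i j : Int) : Int := i * rows + (if PySem.Int.mod i 2 = 0 then j + 1 else rows - j)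

def cRow (rows i : Int) : List Int := (PySem.List.pyRange 0 rows 1).map (cellB rows i)

-- reversing a comprehension over range(0, b) re-indexes it by b-1-j
lemma reverse_map_pyRange (b : Int) (g : Int → Int) :
    ((PySem.List.pyRange 0 b 1).map g).reverse = (PySem.List.pyRange 0 b 1).map (fun j => g (b - 1 - j)) := by
  rw [← List.map_reverse]
  have h : (PySem.List.pyRange 0 b 1).reverse = PySem.List.pyRange (b - 1) (-1) (-1) := by
    rw [PySem.List.pyRange_neg_one_eq_reverse]; norm_num
  rw [h, PySem.List.pyRange_neg_one, PySem.List.pyRange_one]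
  simp [List.map_map, Function.comp]

-- A's i-th row (built with val = i*rows + 1, then possibly reversed) is the canonical row
lemma rowEq (rows i : Int) :
    (if PySem.Int.mod i 2 = 1
      then ((PySem.List.pyRange 0 rows 1).map (fun j => (i * rows + 1) + j)).reverse
      else (PySem.List.pyRange 0 rows 1).map (fun j => (i * rows + 1) + j))
    = cRow rows i := by
  have hm : PySem.Int.mod i 2 = i % 2 := PySem.Int.mod_eq_emod_of_pos (by norm_num)
  rcases Int.emod_two_eq i with h | h
  · rw [if_neg (by omega)]
    apply List.map_congr_left
    intro j _
    simp [cellB, h]; ring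
  · rw [if_pos (by omega), reverse_map_pyRange]
    apply List.map_congr_left
    intro j _
    simp [cellB, h]
    ring

-- A's loop invariant: after the first n outer iterations the state is canonical with val = n*rows + 1
lemma mainInv (rows : Int) (n : Nat) (hn : (n : Int) ≤ rows) :
    (PySem.List.pyRange 0 (n : Int) 1).foldl (aBody rows) ([], PySem.Dict.empty, 1)
    = ((PySem.List.pyRange 0 (n : Int) 1).map (cRow rows),
       (PySem.List.pyRange 0 (n : Int) 1).foldl
         (fun d i => (PySem.List.pyRange 0 rows 1).foldl
             (fun d j => d.insert (cellB rows i j) (i, j)) d)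
         PySem.Dict.empty,
       (n : Int) * rows + 1) := by
  induction n with
  | zero => simp [PySem.List.pyRange_one_eq_nil]
  | succ m ih =>
    have hm : ((m : Int)) ≤ rows := by push_cast at hn ⊢; omega
    have hsplit : PySem.List.pyRange 0 ((m + 1 : Nat) : Int) 1
        = PySem.List.pyRange 0 (m : Int) 1 ++ [(m : Int)] := by
      push_cast
      exact PySem.List.pyRange_one_succ_right (by positivity)
    rw [hsplit, List.foldl_append, List.map_append, List.foldl_append, ih hm]
    simp only [List.foldl_cons, List.foldl_nil]
    unfold aBody
    simp only []
    rw [rowEq rows (m : Int)]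
    refine Prod.ext ?_ (Prod.ext ?_ ?_) <;> simp only []
    · simp
    · apply PySem.List.foldl_congr_mem
      intro acc x hx
      have hx' := (PySem.List.mem_pyRange_one).1 hx
      rw [cRow, PySem.List.pyGetD_map_pyRange_of_nonneg _ _ _ _ hx'.1 hx'.2]
    · push_cast; ring

-- the reflection step of B sends the canonical row i-1 to the canonical row i
lemma reflectRow (rows i : Int) :
    (cRow rows (i - 1)).map (fun x => 2 * i * rows + 1 - x) = cRow rows i := by
  unfold cRow
  rw [List.map_map]
  apply List.map_congr_left
  intro j hj
  have hj' := (PySem.List.mem_pyRange_one).1 hj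
  have hmi : PySem.Int.mod i 2 = i % 2 := PySem.Int.mod_eq_emod_of_pos (by norm_num)
  have hmi1 : PySem.Int.mod (i - 1) 2 = (i - 1) % 2 := PySem.Int.mod_eq_emod_of_pos (by norm_num)
  simp only [Function.comp, cellB, hmi, hmi1]
  split_ifs with ha hb hb
  · exfalso; omega
  · ring
  · ring
  · exfalso; omega

-- B's first row is the canonical row 0
lemma firstRow (rows : Int) : PySem.List.pyRange 1 (rows + 1) 1 = cRow rows 0 := by
  unfold cRow
  rw [PySem.List.pyRange_one, PySem.List.pyRange_one]
  simp only [List.map_map]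
  have he : rows + 1 - 1 = rows - 0 := by ring
  rw [he]
  apply List.map_congr_left
  intro k _
  simp only [Function.comp, cellB]
  rw [if_pos (by decide : PySem.Int.mod 0 2 = 0)]
  ring

-- B's grid loop invariant: after processing range(1, m+1) the state is canonical rows 0..m
lemma bGridInv (rows : Int) (m : Nat) (hm : (m : Int) ≤ rows - 1) :
    (PySem.List.pyRange 1 ((m : Int) + 1) 1).foldl
        (fun st i =>
          let row := st.2.map (fun x => 2 * i * rows + 1 - x)
          (st.1 ++ [row], row))
        ([cRow rows 0], cRow rows 0)
    = ((PySem.List.pyRange 0 ((m : Int) + 1) 1).map (cRow rows), cRow rows (m : Int)) := by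
  induction m with
  | zero =>
    rw [PySem.List.pyRange_one_eq_nil (by norm_num)]
    rw [show ((0:Nat):Int) + 1 = 0 + 1 by norm_num, PySem.List.pyRange_one_singleton]
    simp
  | succ k ih =>
    have hk : ((k : Int)) ≤ rows - 1 := by push_cast at hm ⊢; omega
    have hsplit : PySem.List.pyRange 1 (((k + 1 : Nat) : Int) + 1) 1
        = PySem.List.pyRange 1 ((k : Int) + 1) 1 ++ [(k : Int) + 1] := by
      push_cast
      exact PySem.List.pyRange_one_succ_right (by omega)
    rw [hsplit, List.foldl_append, ih hk]
    simp only [List.foldl_cons, List.foldl_nil]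
    have hr : (cRow rows (k : Int)).map (fun x => 2 * ((k : Int) + 1) * rows + 1 - x)
        = cRow rows ((k : Int) + 1) := by
      have := reflectRow rows ((k : Int) + 1)
      simpa using this
    have hsplit2 : PySem.List.pyRange 0 (((k + 1 : Nat) : Int) + 1) 1
        = PySem.List.pyRange 0 ((k : Int) + 1) 1 ++ [(k : Int) + 1] := by
      push_cast
      exact PySem.List.pyRange_one_succ_right (by positivity)
    rw [hsplit2, List.map_append]
    refine Prod.ext ?_ ?_ <;> simp only []
    · rw [hr]; simp
    · rw [hr]; push_cast; ring_nf

-- enumerating a comprehension over range(0, n) pairs each index with its value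
lemma enumerate_map_pyRange {α : Type} (n : Int) (f : Int → α) :
    PySem.List.enumerate ((PySem.List.pyRange 0 n 1).map f) 0
    = (PySem.List.pyRange 0 n 1).map (fun i => (i, f i)) := by
  rw [PySem.List.pyRange_one]
  simp only [List.map_map]
  induction (n - 0).toNat with
  | zero => simp [PySem.List.enumerate]
  | succ k ih =>
    rw [List.range_succ]
    simp only [List.map_append, List.map_cons, List.map_nil]
    rw [PySem.List.enumerate_append, ih]
    simp [PySem.List.enumerate_cons, PySem.List.enumerate_nil]

-- ===== VERDICT (by name: the statement is the Claim_ definition above) =====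
theorem create_grid_spec : Claim_equal_create_grid := by
  intro rows _
  unfold Spec_create_grid create_grid create_grid_alt
  by_cases h : rows ≤ 0
  · rw [if_neg (by omega)]
    simp [PySem.List.pyRange_one_eq_nil h, PySem.Dict.empty]
  · have h0 : (0 : Int) ≤ rows := by omega
    have hr : ((rows.toNat : Int)) = rows := Int.toNat_of_nonneg h0
    have hinv := mainInv rows rows.toNat (by omega)
    rw [hr] at hinv
    rw [if_pos (by omega), firstRow rows]
    -- rewrite B's grid loop via its invariant at m = rows - 1
    have hm : ((rows - 1).toNat : Int) = rows - 1 := Int.toNat_of_nonneg (by omega)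
    have hg := bGridInv rows (rows - 1).toNat (by omega)
    rw [hm] at hg
    have hgr : rows - 1 + 1 = rows := by ring
    rw [hgr] at hg
    simp only [hinv, hg]
    refine Prod.ext rfl ?_
    simp only []
    congr 1
    -- both dicts are the same nested fold
    rw [enumerate_map_pyRange, List.foldl_map]
    apply PySem.List.foldl_congr_mem
    intro acc i hi
    have hi' := (PySem.List.mem_pyRange_one).1 hi
    rw [cRow, enumerate_map_pyRange, List.foldl_map]
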